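-- pv_equiv track=rewrite | github.com/biostochastics/CodeConCat | codeconcat/parser/language_parsers/enhanced_php_parser.py | _extract_phpdoc
-- ===== SOURCE A (Python) =====
-- from typing import Dict, List, Optional, Set
--
-- def _extract_phpdoc(lines: List[str], current_line: int) -> str:
--     """
--     Extract PHPDoc comments before a declaration.
--
--     Args:
--         lines: List of code lines.
--         current_line: Line number of the declaration.
--
--     Returns:
--         Extracted PHPDoc as a string.
--     """
--     if current_line <= 0:
--         return ""
--
--     # Look for PHPDoc comment before the current line
--     i = current_line - 1
--
--     # Skip blank lines between doc comments and declaration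
--     while i >= 0 and not lines[i].strip():
--         i -= 1
--
--     # Check if we have a PHPDoc comment block
--     if i >= 0 and lines[i].strip().endswith("*/"):
--         # Find start of the comment block
--         end_line = i
--         while i >= 0 and "/**" not in lines[i]:
--             i -= 1
--
--         if i >= 0 and "/**" in lines[i]:
--             start_line = i
--
--             # Extract the comment block
--             doc_lines = []
--             for j in range(start_line, end_line + 1):
--                 line = lines[j].strip()
--                 # Remove comment markers and asterisks
--                 line = line.replace("/**", "").replace("*/", "")
--                 if line.startswith("*"):
--                     line = line[1:].strip()
--                 doc_lines.append(line)
--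
--             return "\n".join(doc_lines).strip()
--
--     return ""
-- ===== SOURCE B (Python) =====
-- from typing import List
--
-- def _clean(line: str) -> str:
--     line = line.strip().replace("/**", "").replace("*/", "")
--     if line.startswith("*"):
--         line = line[1:].strip()
--     return line
--
-- def _extract_phpdoc(lines: List[str], current_line: int) -> str:
--     """Forward single-pass state machine over the prefix before the declaration:
--     keep a buffer of cleaned lines since the most recent '/**', and a candidate
--     answer that is set whenever a non-blank line closes a block with '*/' (and
--     cleared by any other non-blank line); blanks leave the candidate alone."""
--     if current_line <= 0:
--         return ""
--     buf = None          # cleaned lines since the latest '/**', or None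
--     candidate = ""      # doc string valid if only blanks follow it
--     for line in lines[:current_line]:
--         if "/**" in line:
--             buf = []
--         if buf is not None:
--             buf.append(_clean(line))
--         s = line.strip()
--         if s:
--             if buf is not None and s.endswith("*/"):
--                 candidate = "\n".join(buf).strip()
--             else:
--                 candidate = ""
--     return candidate
-- ===== Notes on version B (the rewrite author's own statement) =====
-- stated objective: alternative
-- what changed: Replaces A's backward scans from the declaration (skip blanks, check '*/', search back for '/**', then re-extract forward) with a forward single-pass state machine over lines[:current_line] that maintains a buffer of cleaned lines since the most recent '/**' and a candidate answer set by every block-closing non-blank line and cleared by any other non-blank line.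
import Mathlib
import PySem

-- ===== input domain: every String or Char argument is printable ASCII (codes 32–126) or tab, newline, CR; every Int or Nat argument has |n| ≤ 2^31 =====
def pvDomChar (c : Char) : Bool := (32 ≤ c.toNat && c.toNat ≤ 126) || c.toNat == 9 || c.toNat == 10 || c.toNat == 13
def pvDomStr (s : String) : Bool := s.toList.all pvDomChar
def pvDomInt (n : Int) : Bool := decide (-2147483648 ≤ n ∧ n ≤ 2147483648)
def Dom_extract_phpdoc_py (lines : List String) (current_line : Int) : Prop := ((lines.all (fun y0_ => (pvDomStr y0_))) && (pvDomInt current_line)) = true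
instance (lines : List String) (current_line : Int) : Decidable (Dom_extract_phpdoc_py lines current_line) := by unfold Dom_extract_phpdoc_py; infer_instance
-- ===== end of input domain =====

-- B replaces A's backward scans from the declaration line by a FORWARD single-pass state
-- machine over lines[:current_line] (buffer of cleaned lines since the latest '/**' plus
-- a candidate answer); equivalence of return values is proved, neither program mutates input.

-- ===== PORT A =====
-- A-side helper: 'while i >= 0 and not lines[i].strip(): i -= 1'; fuel n stands for
-- index i = n-1, none stands for i = -1
def pvSkipBlanks (lines : List String) : Nat → Option Nat
  | 0 => none
  | n+1 => if PySem.Str.strip (lines.getD n "") = "" then pvSkipBlanks lines n else some n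

-- A-side helper: 'while i >= 0 and "/**" not in lines[i]: i -= 1' plus the final 'i >= 0' check
def pvFindStart (lines : List String) : Nat → Option Nat
  | 0 => none
  | n+1 => if PySem.Str.isIn "/**" (lines.getD n "") then some n else pvFindStart lines n

def extract_phpdoc_py (lines : List String) (current_line : Int) : String :=
  if current_line ≤ 0 then ""
  else
    match pvSkipBlanks lines current_line.toNat with
    | none => ""
    | some i =>
      if PySem.Str.endswith (PySem.Str.strip (lines.getD i "")) "*/" then
        match pvFindStart lines (i+1) with
        | none => ""
        | some start_line =>
          -- for j in range(start_line, end_line + 1): clean and append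
          let doc_lines := (PySem.List.pyRange (start_line : Int) ((i : Int) + 1) 1).foldl
            (fun acc j =>
              let line := PySem.Str.strip (lines.getD j.toNat "")
              let line := PySem.Str.replace (PySem.Str.replace line "/**" "") "*/" ""
              let line := if PySem.Str.startswith line "*" then
                  PySem.Str.strip (PySem.Str.slice line (some 1) none) else line
              acc ++ [line]) []
          PySem.Str.strip (PySem.Str.join "\n" doc_lines)
      else ""

-- ===== PORT B =====
-- B-side helper: per-line cleaning (_clean in Source B)
def pvCleanLine (s : String) : String :=
  let line := PySem.Str.strip s
  let line := PySem.Str.replace (PySem.Str.replace line "/**" "") "*/" ""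
  if PySem.Str.startswith line "*" then
    PySem.Str.strip (PySem.Str.slice line (some 1) none) else line

-- B-side helper: one iteration of the forward loop; state = (buf, candidate)
def pvStep (st : Option (List String) × String) (line : String) : Option (List String) × String :=
  let buf := if PySem.Str.isIn "/**" line then some ([] : List String) else st.1
  let buf := match buf with
    | none => none
    | some b => some (b ++ [pvCleanLine line])
  let s := PySem.Str.strip line
  if s = "" then (buf, st.2)
  else
    match buf with
    | some b =>
      if PySem.Str.endswith s "*/" then (buf, PySem.Str.strip (PySem.Str.join "\n" b))
      else (buf, "")
    | none => (buf, "")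

def extract_phpdoc_py_alt (lines : List String) (current_line : Int) : String :=
  if current_line ≤ 0 then ""
  else ((PySem.List.slice lines none (some current_line)).foldl pvStep (none, "")).2

-- ===== PRECONDITION & SPEC =====
-- Pre_ excludes exactly the inputs where Python A raises IndexError:
-- lines[current_line - 1] past the end of the list.
def Pre_extract_phpdoc_py (lines : List String) (current_line : Int) : Prop :=
  current_line ≤ 0 ∨ current_line ≤ (lines.length : Int)
instance (lines : List String) (current_line : Int) : Decidable (Pre_extract_phpdoc_py lines current_line) := by unfold Pre_extract_phpdoc_py; infer_instance

def pvWitness_extract_phpdoc_py : List String × Int := (["/** doc */"], 1)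

def Spec_extract_phpdoc_py (lines : List String) (current_line : Int) (out : String) : Prop := out = extract_phpdoc_py_alt lines current_line
instance (lines : List String) (current_line : Int) (out : String) : Decidable (Spec_extract_phpdoc_py lines current_line out) := by unfold Spec_extract_phpdoc_py; infer_instance

-- ===== CLAIM (what is proved, stated in full; the proofs are below) =====
def Claim_equal_extract_phpdoc_py : Prop := ∀ (lines : List String) (current_line : Int), Dom_extract_phpdoc_py lines current_line → Pre_extract_phpdoc_py lines current_line → Spec_extract_phpdoc_py lines current_line (extract_phpdoc_py lines current_line)

-- ===== LEMMAS AND PROOFS =====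

-- the cleaned lines from index s up to n-1, in increasing order
def pvDocList (lines : List String) (s n : Nat) : List String :=
  (List.range (n - s)).map (fun k => pvCleanLine (lines.getD (s + k) ""))

-- A's value as a function of the fuel n = current_line (used as the bridge between the ports)
def pvAval (lines : List String) (n : Nat) : String :=
  match pvSkipBlanks lines n with
  | none => ""
  | some i =>
    if PySem.Str.endswith (PySem.Str.strip (lines.getD i "")) "*/" then
      match pvFindStart lines (i+1) with
      | none => ""
      | some s => PySem.Str.strip (PySem.Str.join "\n" (pvDocList lines s (i+1)))
    else ""

theorem pvFindStart_lt (lines : List String) : ∀ n s, pvFindStart lines n = some s → s < n := by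
  intro n
  induction n with
  | zero => intro s h; simp [pvFindStart] at h
  | succ m ih =>
    intro s h
    simp only [pvFindStart] at h
    split at h
    · cases h; omega
    · exact Nat.lt_succ_of_lt (ih s h)

theorem pvDocList_concat (lines : List String) (s n : Nat) (h : s ≤ n) :
    pvDocList lines s (n+1) = pvDocList lines s n ++ [pvCleanLine (lines.getD n "")] := by
  unfold pvDocList
  have h1 : n + 1 - s = (n - s) + 1 := by omega
  rw [h1, List.range_succ, List.map_append]
  have h2 : s + (n - s) = n := by omega
  simp [h2]

theorem pvFoldA (lines : List String) :
    ∀ (l : List Int) (acc : List String),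
      l.foldl (fun acc j =>
        let line := PySem.Str.strip (lines.getD j.toNat "")
        let line := PySem.Str.replace (PySem.Str.replace line "/**" "") "*/" ""
        let line := if PySem.Str.startswith line "*" then
            PySem.Str.strip (PySem.Str.slice line (some 1) none) else line
        acc ++ [line]) acc
      = acc ++ l.map (fun j => pvCleanLine (lines.getD j.toNat "")) := by
  intro l
  induction l with
  | nil => simp
  | cons y l ih =>
    intro acc
    simp only [List.foldl_cons, List.map_cons]
    rw [ih]
    simp [pvCleanLine]

theorem pvA_doc_eq (lines : List String) (s i : Nat) :
    (PySem.List.pyRange (s : Int) ((i : Int) + 1) 1).foldl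
      (fun acc j =>
        let line := PySem.Str.strip (lines.getD j.toNat "")
        let line := PySem.Str.replace (PySem.Str.replace line "/**" "") "*/" ""
        let line := if PySem.Str.startswith line "*" then
            PySem.Str.strip (PySem.Str.slice line (some 1) none) else line
        acc ++ [line]) []
    = pvDocList lines s (i+1) := by
  rw [pvFoldA, PySem.List.pyRange_one, List.map_map]
  have hcast : ((i : Int) + 1 - (s : Int)).toNat = i + 1 - s := by omega
  unfold pvDocList
  rw [hcast]
  simp only [List.nil_append]
  apply List.map_congr_left
  intro k _
  have hk : ((s : Int) + (k : Int)).toNat = s + k := by omega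
  simp only [Function.comp_apply, hk]

-- A's port equals pvAval at n = current_line.toNat
theorem pvA_eq_pvAval (lines : List String) (current_line : Int) (h : ¬ current_line ≤ 0) :
    extract_phpdoc_py lines current_line = pvAval lines current_line.toNat := by
  unfold extract_phpdoc_py pvAval
  rw [if_neg h]
  cases hsk : pvSkipBlanks lines current_line.toNat with
  | none => rfl
  | some i =>
    simp only
    split
    · cases hfs : pvFindStart lines (i+1) with
      | none => rfl
      | some s => simp only [pvA_doc_eq]
    · rfl

theorem pvBlank_no_open (line : String) (h : PySem.Str.strip line = "") :
    PySem.Str.isIn "/**" line = false := by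
  by_contra hc
  have hin : PySem.Str.isIn "/**" line = true := by
    cases hb : PySem.Str.isIn "/**" line
    · exact absurd hb hc
    · rfl
  have hinf : ("/**".toList) <:+: line.toList := (PySem.Str.isIn_iff_infix _ _).mp hin
  have hmem : '/' ∈ line.toList := by
    obtain ⟨p, q, hpq⟩ := hinf
    rw [← hpq]; simp
  have hl : PySem.Chars.strip line.toList = [] := by
    have := congrArg String.toList h
    simpa using this
  unfold PySem.Chars.strip PySem.Chars.rstrip PySem.Chars.lstrip at hl
  have h2 : List.dropWhile PySem.Chars.isspace
      (List.dropWhile PySem.Chars.isspace line.toList).reverse = [] := by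
    have := congrArg List.reverse hl
    simpa using this
  have hall : ∀ c ∈ line.toList, PySem.Chars.isspace c = true := by
    intro c hc'
    rw [← List.takeWhile_append_dropWhile (p := PySem.Chars.isspace) (l := line.toList)] at hc'
    rcases List.mem_append.mp hc' with h1 | h1
    · exact List.mem_takeWhile_imp h1
    · exact List.dropWhile_eq_nil_iff.mp h2 c (by simpa using h1)
  have : PySem.Chars.isspace '/' = true := hall '/' hmem
  simp [PySem.Chars.isspace] at this

theorem pvFold_inv (lines : List String) : ∀ n, n ≤ lines.length →
    (lines.take n).foldl pvStep ((none : Option (List String)), "") =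
      ((pvFindStart lines n).map (fun s => pvDocList lines s n), pvAval lines n) := by
  intro n
  induction n with
  | zero => intro _; simp [pvFindStart, pvAval, pvSkipBlanks]
  | succ m ih =>
    intro hm
    have hm' : m < lines.length := by omega
    have hget : lines.getD m "" = lines[m] := by
      simp [List.getD_eq_getElem?_getD, List.getElem?_eq_getElem hm']
    have htake : lines.take (m+1) = lines.take m ++ [lines[m]] := by
      rw [List.take_add_one, List.getElem?_eq_getElem hm']
      simp
    have hskip_succ : pvSkipBlanks lines (m+1)
        = if PySem.Str.strip lines[m] = "" then pvSkipBlanks lines m else some m := by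
      simp only [pvSkipBlanks, hget]
    have hfind_succ : pvFindStart lines (m+1)
        = if PySem.Str.isIn "/**" lines[m] then some m else pvFindStart lines m := by
      simp only [pvFindStart, hget]
    have hdoc : ∀ s, s ≤ m → pvDocList lines s (m+1) = pvDocList lines s m ++ [pvCleanLine lines[m]] := by
      intro s hs
      rw [pvDocList_concat lines s m hs, hget]
    rw [htake, List.foldl_append, ih (by omega), List.foldl_cons, List.foldl_nil]
    unfold pvStep
    by_cases hblank : PySem.Str.strip lines[m] = ""
    · have hopen : PySem.Str.isIn "/**" lines[m] = false := pvBlank_no_open _ hblank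
      have hav : pvAval lines (m+1) = pvAval lines m := by
        unfold pvAval
        rw [hskip_succ, if_pos hblank]
      rw [hav, hfind_succ]
      simp only [hopen, Bool.false_eq_true, if_false, hblank]
      cases hq : pvFindStart lines m with
      | none => simp
      | some s =>
        have hs : s < m := pvFindStart_lt lines m s hq
        simp [hdoc s (Nat.le_of_lt hs)]
    · have hsk : pvSkipBlanks lines (m+1) = some m := by
        rw [hskip_succ, if_neg hblank]
      have havm : pvAval lines (m+1) =
          (if PySem.Str.endswith (PySem.Str.strip lines[m]) "*/" then
            match pvFindStart lines (m+1) with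
            | none => ""
            | some s => PySem.Str.strip (PySem.Str.join "\n" (pvDocList lines s (m+1)))
          else "") := by
        unfold pvAval
        rw [hsk]
        simp only [hget]
      rw [if_neg hblank]
      by_cases hopen : PySem.Str.isIn "/**" lines[m] = true
      · have hfs : pvFindStart lines (m+1) = some m := by
          rw [hfind_succ, if_pos hopen]
        rw [hfs] at havm
        simp only [hopen, if_true, hfs, Option.map_some, havm]
        have hd1 : pvDocList lines m (m+1) = [pvCleanLine lines[m]] := by
          simp [pvDocList, List.getElem?_eq_getElem hm']
        rw [hd1]
        split_ifs with he <;> simp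
      · have hopen' : PySem.Str.isIn "/**" lines[m] = false := by
          cases hb : PySem.Str.isIn "/**" lines[m]
          · rfl
          · exact absurd hb hopen
        have hfs : pvFindStart lines (m+1) = pvFindStart lines m := by
          rw [hfind_succ, if_neg (by rw [hopen']; exact Bool.false_ne_true)]
        rw [hfs] at havm
        simp only [hopen', Bool.false_eq_true, if_false, hfs]
        cases hq : pvFindStart lines m with
        | none =>
          simp only [hq, Option.map_none, havm]
          split_ifs <;> rfl
        | some s =>
          have hs : s < m := pvFindStart_lt lines m s hq
          simp only [hq, Option.map_some, havm, hdoc s (Nat.le_of_lt hs)]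
          split_ifs with he
          · rfl
          · rfl

-- ===== VERDICT (by name: the statements are the Claim_ definitions above) =====
theorem extract_phpdoc_py_spec : Claim_equal_extract_phpdoc_py := by
  intro lines current_line _ hpre
  unfold Spec_extract_phpdoc_py extract_phpdoc_py_alt
  by_cases h0 : current_line ≤ 0
  · rw [if_pos h0]
    unfold extract_phpdoc_py
    rw [if_pos h0]
  · rw [if_neg h0]
    have hcl : current_line.toNat ≤ lines.length := by
      rcases hpre with h | h
      · omega
      · omega
    have hsl : PySem.List.slice lines none (some current_line) = lines.take current_line.toNat :=
      PySem.List.slice_to lines (by omega)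
    rw [hsl, pvFold_inv lines current_line.toNat hcl, pvA_eq_pvAval lines current_line h0]
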